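-- pv_equiv track=rewrite | github.com/ccoutant/dwarf-stage | tools/html-to-md.py | hanging_indent
-- ===== SOURCE A (Python) =====
-- def hanging_indent(text, marker):
--     prefix = " " * len(marker)
--     lines = []
--     for s in text.split("\n"):
--         if lines:
--             lines.append(prefix + s.strip())
--         elif s:
--             lines.append(marker + s.strip())
--         else:
--             lines.append("")
--     return "\n".join(lines)
-- ===== SOURCE B (Python) =====
-- def hanging_indent(text, marker):
--     head, sep, text = text.partition("\n")
--     out = marker + head.strip() if head else ""
--     prefix = " " * len(marker)
--     while sep:
--         head, sep, text = text.partition("\n")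
--         out += "\n" + prefix + head.strip()
--     return out
-- ===== Notes on version B (the rewrite author's own statement) =====
-- stated objective: alternative
-- what changed: B never builds the list of lines: it scans the raw string with str.partition in a while loop driven by the separator flag, accumulating the output string directly, with no split, no list accumulator and no join.
import Mathlib
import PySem

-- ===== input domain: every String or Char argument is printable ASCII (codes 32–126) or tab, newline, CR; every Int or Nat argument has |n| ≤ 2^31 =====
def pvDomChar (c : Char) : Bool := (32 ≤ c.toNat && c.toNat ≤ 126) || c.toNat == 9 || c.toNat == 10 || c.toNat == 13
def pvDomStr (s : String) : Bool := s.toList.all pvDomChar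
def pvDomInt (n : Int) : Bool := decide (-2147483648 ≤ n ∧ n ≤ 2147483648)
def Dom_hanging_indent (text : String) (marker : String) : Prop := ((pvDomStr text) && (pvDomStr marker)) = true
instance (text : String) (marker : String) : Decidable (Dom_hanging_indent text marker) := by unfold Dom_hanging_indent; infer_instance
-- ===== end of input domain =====

-- B replaces A's split/loop/join over the line list by a partition-driven scan of the raw
-- string that accumulates the output directly (objective: alternative, same cost).

-- used by the ports' termination: a list containing '\n' has a strictly shorter '\n'-free prefix
lemma takeWhile_nl_lt (s : List Char) (h : '\n' ∈ s) :
    (s.takeWhile (· ≠ '\n')).length < s.length := by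
  have hpre := List.takeWhile_prefix (l := s) (· ≠ '\n')
  rcases Nat.lt_or_ge (s.takeWhile (· ≠ '\n')).length s.length with hlt | hge
  · exact hlt
  · exfalso
    have heq : s.takeWhile (· ≠ '\n') = s :=
      hpre.eq_of_length (le_antisymm hpre.length_le hge)
    have := List.takeWhile_eq_self_iff.mp heq '\n' h
    simp at this

-- ===== PORT A =====
-- literal port of A: fold over the split lines, branching on whether the accumulator is still empty
def hanging_indent (text : String) (marker : String) : String :=
  let pre : List Char := List.replicate marker.toList.length ' '
  let lines : List (List Char) :=
    (PySem.Chars.splitOn text.toList ['\n']).foldl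
      (fun ls s =>
        if ls ≠ [] then ls ++ [pre ++ PySem.Chars.strip s]
        else if s ≠ [] then ls ++ [marker.toList ++ PySem.Chars.strip s]
        else ls ++ [([] : List Char)])
      []
  String.mk (PySem.Chars.join ['\n'] lines)

-- ===== PORT B =====
-- text.partition("\n"): head = chars before the first '\n'; the separator is found iff '\n' ∈ s;
-- the remainder starts one past the head.
-- the while loop of Source B: `sep` is truthy (a '\n' was found), so partition the remaining text,
-- append "\n" + prefix + head.strip() to out, and continue while a separator was found.
def hanging_indent_altLoop (pre : List Char) (out : List Char) (s : List Char) : List Char :=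
  let head := s.takeWhile (· ≠ '\n')
  let out' := out ++ '\n' :: (pre ++ PySem.Chars.strip head)
  if h : '\n' ∈ s then
    hanging_indent_altLoop pre out' (s.drop (head.length + 1))
  else out'
termination_by s.length
decreasing_by
  have := takeWhile_nl_lt s h
  simp only [List.length_drop]
  omega

-- literal port of B: first partition and the head-line special case, then the while loop
def hanging_indent_alt (text : String) (marker : String) : String :=
  let s := text.toList
  let head := s.takeWhile (· ≠ '\n')
  let out := if head ≠ [] then marker.toList ++ PySem.Chars.strip head else []
  let pre : List Char := List.replicate marker.toList.length ' '
  String.mk (if '\n' ∈ s then hanging_indent_altLoop pre out (s.drop (head.length + 1)) else out)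

-- ===== PRECONDITION & SPEC =====
def Spec_hanging_indent (text : String) (marker : String) (out : String) : Prop := out = hanging_indent_alt text marker
instance (text : String) (marker : String) (out : String) : Decidable (Spec_hanging_indent text marker out) := by unfold Spec_hanging_indent; infer_instance

-- ===== CLAIM (what is proved, stated in full; the proofs are below) =====
def Claim_equal_hanging_indent : Prop := ∀ (text : String) (marker : String), Dom_hanging_indent text marker → Spec_hanging_indent text marker (hanging_indent text marker)

-- ===== LEMMAS AND PROOFS =====

-- proof-only spec of splitting at '\n': head line, then recursively the rest
def splitNl (s : List Char) : List (List Char) :=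
  let head := s.takeWhile (· ≠ '\n')
  if h : '\n' ∈ s then head :: splitNl (s.drop (head.length + 1)) else [s]
termination_by s.length
decreasing_by
  have := takeWhile_nl_lt s h
  simp only [List.length_drop]
  omega

lemma takeWhile_nl_of_not_mem (s : List Char) (h : '\n' ∉ s) :
    s.takeWhile (· ≠ '\n') = s :=
  List.takeWhile_eq_self_iff.mpr (fun c hc => by
    simp only [decide_eq_true_eq, ne_eq]
    rintro rfl; exact h hc)

-- PySem's splitOn on the one-char separator '\n' is splitNl
lemma splitOn_go_eq (fuel : Nat) (l cur : List Char) (acc : List (List Char))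
    (hf : l.length < fuel) :
    PySem.Chars.splitOn.go ['\n'] fuel l cur acc
      = acc.reverse ++ (splitNl l).modifyHead (fun x => cur.reverse ++ x) := by
  induction fuel generalizing l cur acc with
  | zero => omega
  | succ fuel ih =>
      cases l with
      | nil =>
          rw [splitNl]
          simp [PySem.Chars.splitOn.go]
      | cons c rest =>
          rw [splitNl]
          by_cases hc : c = '\n'
          · subst hc
            simp only [PySem.Chars.splitOn.go, List.isPrefixOf, beq_self_eq_true,
              Bool.true_and, List.isPrefixOf_nil_left, if_true, List.length_cons,
              List.length_nil, List.drop_succ_cons, List.drop_zero]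
            rw [ih rest [] (cur.reverse :: acc) (by simpa using hf)]
            simp only [List.takeWhile, List.reverse_cons, List.reverse_nil, List.nil_append,
              List.append_assoc, List.singleton_append, List.modifyHead_cons, List.nil_append]
            cases hsp : splitNl rest <;> simp [hsp]
          · have hpre : (['\n'].isPrefixOf (c :: rest)) = false := by
              simp only [List.isPrefixOf, List.isPrefixOf_nil_left, Bool.and_true]
              simpa using fun hh => hc hh.symm
            simp only [PySem.Chars.splitOn.go, hpre, Bool.false_eq_true, if_false]
            rw [ih rest (c :: cur) acc (by simpa using hf)]
            have hmem : ('\n' ∈ c :: rest) ↔ ('\n' ∈ rest) := by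
              simp only [List.mem_cons]
              constructor
              · rintro (hh | hh)
                · exact absurd hh.symm hc
                · exact hh
              · exact Or.inr
            conv_lhs => rw [splitNl]
            by_cases hm : '\n' ∈ rest
            · simp only [hm, hmem.mpr hm, dite_true, List.takeWhile_cons,
                List.modifyHead_cons]
              simp [hc, List.takeWhile]
            · simp only [hm, (by simpa [hmem] using hm : ¬ '\n' ∈ c :: rest), dite_false]
              simp [hc]

lemma splitOn_eq_splitNl (s : List Char) :
    PySem.Chars.splitOn s ['\n'] = splitNl s := by
  unfold PySem.Chars.splitOn
  rw [splitOn_go_eq (s.length + 1) s [] [] (by omega)]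
  cases splitNl s <;> simp

-- join with "\n" of a nonempty list, as head plus a flatMap
lemma join_nl_cons (x : List Char) (xs : List (List Char)) :
    PySem.Chars.join ['\n'] (x :: xs) = x ++ xs.flatMap (fun l => '\n' :: l) := by
  induction xs generalizing x with
  | nil => simp [PySem.Chars.join, List.intercalate]
  | cons y ys ih =>
      have hy := ih y
      simp only [PySem.Chars.join, List.intercalate] at hy ⊢
      simp only [List.intersperse, List.flatMap_cons] at hy ⊢
      cases ys <;> simp_all [List.intersperse]

-- Once the accumulator is nonempty, A's loop only ever takes the first branch
lemma fold_tail_eq_map (pre mk : List Char) (rest : List (List Char)) (acc : List (List Char))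
    (h : acc ≠ []) :
    rest.foldl
      (fun ls s =>
        if ls ≠ [] then ls ++ [pre ++ PySem.Chars.strip s]
        else if s ≠ [] then ls ++ [mk ++ PySem.Chars.strip s]
        else ls ++ [([] : List Char)])
      acc
      = acc ++ rest.map (fun s => pre ++ PySem.Chars.strip s) := by
  induction rest generalizing acc with
  | nil => simp
  | cons s rest ih =>
      simp only [List.foldl_cons, List.map_cons, if_pos h]
      rw [ih _ (by simp)]
      simp

-- B's while loop appends exactly the joined indented lines of the remaining text
lemma altLoop_eq (pre out : List Char) (s : List Char) :
    hanging_indent_altLoop pre out s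
      = out ++ (splitNl s).flatMap (fun l => '\n' :: (pre ++ PySem.Chars.strip l)) := by
  induction hn : s.length using Nat.strong_induction_on generalizing out s with
  | _ n ih =>
      subst hn
      rw [hanging_indent_altLoop, splitNl]
      by_cases h : '\n' ∈ s
      · simp only [h, dite_true]
        have hlt := takeWhile_nl_lt s h
        rw [ih (s.drop ((s.takeWhile (· ≠ '\n')).length + 1)).length
            (by simp only [List.length_drop]; omega) _ _ rfl]
        simp
      · simp only [h, dite_false]
        rw [takeWhile_nl_of_not_mem s h]
        simp

-- ===== VERDICT (by name: the statement is the Claim_ definition above) =====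
theorem hanging_indent_spec : Claim_equal_hanging_indent := by
  intro text marker _
  show hanging_indent text marker = hanging_indent_alt text marker
  unfold hanging_indent hanging_indent_alt
  simp only [splitOn_eq_splitNl]
  rw [splitNl]
  by_cases h : '\n' ∈ text.toList
  · simp only [h, dite_true, List.foldl_cons, if_true]
    rw [altLoop_eq]
    by_cases h0 : text.toList.takeWhile (· ≠ '\n') = ([] : List Char)
    · rw [h0]
      simp only [ne_eq, not_true_eq_false, if_false, not_false_eq_true, if_true,
        List.nil_append]
      rw [fold_tail_eq_map _ _ _ [([] : List Char)] (by simp), List.singleton_append,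
        join_nl_cons]
      simp [List.flatMap_map]
    · rw [if_neg (by simpa using h0)]
      simp only [ne_eq, h0, not_false_eq_true, if_true, List.nil_append]
      rw [fold_tail_eq_map _ _ _ [marker.toList ++ PySem.Chars.strip _] (by simp),
        List.singleton_append, join_nl_cons]
      simp [List.flatMap_map]
  · simp only [h, dite_false, List.foldl_cons, List.foldl_nil]
    rw [takeWhile_nl_of_not_mem _ h]
    by_cases h0 : text.toList = ([] : List Char)
    · simp [h0, PySem.Chars.join, List.intercalate, PySem.Chars.strip,
        PySem.Chars.lstrip, PySem.Chars.rstrip]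
    · simp only [ne_eq, h0, not_false_eq_true, if_true, List.nil_append]
      simp [PySem.Chars.join, List.intercalate]
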